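-- pv_equiv track=rewrite | github.com/TayJen/algorithms_practice | hw_8/E.py | longest_correct_bracket_subsequence
-- ===== SOURCE A (Python) =====
-- def longest_correct_bracket_subsequence(s: str):
--     n = len(s)
--
--     dp = []
--     for i in range(n):
--         dp.append([0] * n)
--
--     for i in range(n-1):
--         if (s[i] + s[i + 1]) in ("()", "[]", "{}"):
--             dp[i][i + 1] = 2
--
--     for length in range(2, n + 1):
--         for i in range(n - length + 1):
--             j = i + length - 1
--             if (s[i] + s[j]) in ("()", "[]", "{}"):
--                 dp[i][j] = 2 + dp[i+1][j-1]
--             for k in range(i, j):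
--                 dp[i][j] = max(dp[i][j], dp[i][k] + dp[k+1][j])
--
--     return dp[0][n-1]
-- ===== SOURCE B (Python) =====
-- def longest_correct_bracket_subsequence(s: str):
--     # Top-down memoized interval recursion: enumerate the partner k of the
--     # first bracket s[i] instead of matching ends + splitting at every k.
--     n = len(s)
--     memo = {}
--
--     def f(i, j):
--         if i >= j:
--             return 0
--         if (i, j) in memo:
--             return memo[(i, j)]
--         best = f(i + 1, j)
--         for k in range(i + 1, j + 1):
--             if s[i] + s[k] in ("()", "[]", "{}"):
--                 cand = 2 + f(i + 1, k - 1) + f(k + 1, j)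
--                 if cand > best:
--                     best = cand
--         memo[(i, j)] = best
--         return best
--
--     # warm the cache by increasing interval width so no call recurses deeply
--     for width in range(2, n + 1):
--         for i in range(n - width + 1):
--             f(i, i + width - 1)
--     return f(0, n - 1)
-- ===== Notes on version B (the rewrite author's own statement) =====
-- stated objective: alternative
-- what changed: Replaces A's bottom-up table with end-matching-plus-split-at-every-k recurrence by a top-down memoized recursion whose recurrence skips s[i] or enumerates the partner k of the first bracket (f(i,j) = max(f(i+1,j), max over matching k of 2+f(i+1,k-1)+f(k+1,j))), a differently-shaped traversal of the same intervals.
-- outside the precondition, e.g. on longest_correct_bracket_subsequence(''): A raises IndexError, B returns 0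
import Mathlib
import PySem

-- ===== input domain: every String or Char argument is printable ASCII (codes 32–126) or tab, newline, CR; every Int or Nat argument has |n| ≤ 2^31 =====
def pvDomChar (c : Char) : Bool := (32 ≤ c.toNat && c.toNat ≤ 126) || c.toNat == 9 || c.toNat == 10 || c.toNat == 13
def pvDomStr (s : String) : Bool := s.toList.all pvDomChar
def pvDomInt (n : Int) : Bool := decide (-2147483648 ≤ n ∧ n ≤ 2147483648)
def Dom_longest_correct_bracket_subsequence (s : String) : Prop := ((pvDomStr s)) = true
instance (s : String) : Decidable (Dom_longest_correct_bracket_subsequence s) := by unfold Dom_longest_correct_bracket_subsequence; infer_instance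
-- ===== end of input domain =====

-- B replaces A's bottom-up table (end-match + split at every k) by a top-down memoized
-- recursion that skips s[i] or enumerates the partner k of the first bracket; same exact
-- values, a genuinely different recurrence/decomposition (objective: alternative).

-- ===== PORT A =====
-- s[i] + s[j] in ("()", "[]", "{}")  (indices are always in range where A reads)
def pvPair (a b : Char) : Bool :=
  (a == '(' && b == ')') || (a == '[' && b == ']') || (a == '{' && b == '}')

def pvChar (cs : List Char) (i : Nat) : Char := cs.getD i ' '

-- dp[i][j] read / write on the list-of-lists table (all accesses A makes are in range)
def pvGet2 (dp : List (List Int)) (i j : Nat) : Int := (dp.getD i []).getD j 0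

def pvSet2 (dp : List (List Int)) (i j : Nat) (v : Int) : List (List Int) :=
  dp.set i ((dp.getD i []).set j v)

def longest_correct_bracket_subsequence (s : String) : Int :=
  let cs := s.toList
  let n := cs.length
  -- dp = []; for i in range(n): dp.append([0] * n)
  let dp0 : List (List Int) := (List.range n).foldl (fun dp _ => dp ++ [List.replicate n (0 : Int)]) []
  -- for i in range(n-1): if s[i]+s[i+1] matches: dp[i][i+1] = 2
  let dp1 := (List.range (n - 1)).foldl (fun dp i =>
    if pvPair (pvChar cs i) (pvChar cs (i + 1)) then pvSet2 dp i (i + 1) 2 else dp) dp0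
  -- for length in range(2, n+1): for i in range(n-length+1): ...
  let dp2 := (List.range' 2 (n - 1)).foldl (fun dp len =>
    (List.range (n - len + 1)).foldl (fun dp i =>
      let j := i + len - 1
      let dpA := if pvPair (pvChar cs i) (pvChar cs j)
                 then pvSet2 dp i j (2 + pvGet2 dp (i + 1) (j - 1)) else dp
      (List.range' i (j - i)).foldl (fun dp k =>
        pvSet2 dp i j (max (pvGet2 dp i j) (pvGet2 dp i k + pvGet2 dp (k + 1) j))) dpA) dp) dp1
  pvGet2 dp2 0 (n - 1)

-- ===== PORT B =====
-- f(i, j): skip s[i] (best = f(i+1,j)), or pick the partner k of s[i] in i+1..j.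
-- Source B memoizes f (a value-transparent cache); the fuel argument makes the same
-- recursion structurally terminating (fuel ≥ j - i is always enough).
def pvF (cs : List Char) : Nat → Nat → Nat → Int
  | 0, _, _ => 0
  | fuel + 1, i, j =>
    if j ≤ i then 0
    else
      (List.range' (i + 1) (j - i)).foldl (fun best k =>
        if pvPair (pvChar cs i) (pvChar cs k)
        then max best (2 + pvF cs fuel (i + 1) (k - 1) + pvF cs fuel (k + 1) j)
        else best) (pvF cs fuel (i + 1) j)

def longest_correct_bracket_subsequence_alt (s : String) : Int :=
  let cs := s.toList
  pvF cs cs.length 0 (cs.length - 1)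

-- ===== PRECONDITION & SPEC =====
-- A raises IndexError on the empty string (dp[0][n-1] on an empty table); excluded.
def Pre_longest_correct_bracket_subsequence (s : String) : Prop := s ≠ ""
instance (s : String) : Decidable (Pre_longest_correct_bracket_subsequence s) := by
  unfold Pre_longest_correct_bracket_subsequence; infer_instance
def pvWitness_longest_correct_bracket_subsequence : String := "([]{})"

def Spec_longest_correct_bracket_subsequence (s : String) (out : Int) : Prop := out = longest_correct_bracket_subsequence_alt s
instance (s : String) (out : Int) : Decidable (Spec_longest_correct_bracket_subsequence s out) := by unfold Spec_longest_correct_bracket_subsequence; infer_instance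

-- ===== CLAIM (what is proved, stated in full; the proofs are below) =====
def Claim_equal_longest_correct_bracket_subsequence : Prop := ∀ (s : String), Dom_longest_correct_bracket_subsequence s → Pre_longest_correct_bracket_subsequence s → Spec_longest_correct_bracket_subsequence s (longest_correct_bracket_subsequence s)

-- ===== LEMMAS AND PROOFS =====

-- ---- generic lemmas about max-accumulating folds ----

theorem mfold_ge_init (l : List Nat) (g : Nat → Int) :
    ∀ init : Int, init ≤ l.foldl (fun a k => max a (g k)) init := by
  induction l with
  | nil => intro init; exact le_refl _
  | cons k l ih => intro init; exact le_trans (le_max_left _ _) (ih _)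

theorem mfold_le (l : List Nat) (g : Nat → Int) (M : Int) :
    ∀ init : Int, init ≤ M → (∀ k ∈ l, g k ≤ M) →
    l.foldl (fun a k => max a (g k)) init ≤ M := by
  induction l with
  | nil => intro init h _; exact h
  | cons k l ih =>
    intro init h hall
    exact ih _ (max_le h (hall k (List.mem_cons_self)))
      (fun k' hk' => hall k' (List.mem_cons_of_mem _ hk'))

theorem mfold_term_le (l : List Nat) (g : Nat → Int) (k : Nat) (hk : k ∈ l) :
    ∀ init : Int, g k ≤ l.foldl (fun a k => max a (g k)) init := by
  induction l with
  | nil => cases hk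
  | cons x l ih =>
    intro init
    rcases List.mem_cons.1 hk with h | h
    · subst h; exact le_trans (le_max_right _ _) (mfold_ge_init _ _ _)
    · exact ih h _

theorem mfold_from_max (l : List Nat) (g : Nat → Int) :
    ∀ a b : Int, l.foldl (fun a k => max a (g k)) (max a b) =
      max a (l.foldl (fun a k => max a (g k)) b) := by
  induction l with
  | nil => intro a b; rfl
  | cons k l ih =>
    intro a b
    have : max (max a b) (g k) = max a (max b (g k)) := max_assoc a b (g k)
    rw [List.foldl_cons, List.foldl_cons, this, ih]

theorem cfold_ge_init (l : List Nat) (p : Nat → Bool) (g : Nat → Int) :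
    ∀ init : Int, init ≤ l.foldl (fun a k => if p k then max a (g k) else a) init := by
  induction l with
  | nil => intro init; exact le_refl _
  | cons k l ih =>
    intro init
    refine le_trans ?_ (ih _)
    by_cases h : p k = true
    · simp only [h, if_true]; exact le_max_left _ _
    · simp only [h]; simp at h; simp
  
theorem cfold_le (l : List Nat) (p : Nat → Bool) (g : Nat → Int) (M : Int) :
    ∀ init : Int, init ≤ M → (∀ k ∈ l, p k = true → g k ≤ M) →
    l.foldl (fun a k => if p k then max a (g k) else a) init ≤ M := by
  induction l with
  | nil => intro init h _; exact h
  | cons k l ih =>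
    intro init h hall
    refine ih _ ?_ (fun k' hk' hp => hall k' (List.mem_cons_of_mem _ hk') hp)
    by_cases hp : p k = true
    · simp only [hp, if_true]; exact max_le h (hall k List.mem_cons_self hp)
    · simp only [hp]; simp at hp; simp; exact h

theorem cfold_term_le (l : List Nat) (p : Nat → Bool) (g : Nat → Int) (k : Nat)
    (hk : k ∈ l) (hp : p k = true) :
    ∀ init : Int, g k ≤ l.foldl (fun a k => if p k then max a (g k) else a) init := by
  induction l with
  | nil => cases hk
  | cons x l ih =>
    intro init
    rcases List.mem_cons.1 hk with h | h
    · subst h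
      refine le_trans ?_ (cfold_ge_init l p g _)
      simp only [hp, if_true]; exact le_max_right _ _
    · exact ih h _

-- ---- A's recurrence as a fueled function ----

def pvD (cs : List Char) : Nat → Nat → Nat → Int
  | 0, _, _ => 0
  | fuel + 1, i, j =>
    if j ≤ i then 0
    else
      (List.range' i (j - i)).foldl
        (fun a k => max a (pvD cs fuel i k + pvD cs fuel (k + 1) j))
        (if pvPair (pvChar cs i) (pvChar cs j) then 2 + pvD cs fuel (i + 1) (j - 1) else 0)

theorem pvD_fuel (cs : List Char) :
    ∀ f1 f2 i j, j - i ≤ f1 → j - i ≤ f2 → pvD cs f1 i j = pvD cs f2 i j := by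
  intro f1
  induction f1 with
  | zero =>
    intro f2 i j h1 _
    have hji : j ≤ i := by omega
    cases f2 <;> simp [pvD, hji]
  | succ f1 ih =>
    intro f2 i j h1 h2
    cases f2 with
    | zero =>
      have hji : j ≤ i := by omega
      simp [pvD, hji]
    | succ f2 =>
      by_cases hji : j ≤ i
      · simp [pvD, hji]
      · have hij : i < j := by omega
        simp only [pvD, if_neg hji]
        have hinit : (if pvPair (pvChar cs i) (pvChar cs j) then 2 + pvD cs f1 (i + 1) (j - 1) else 0)
            = (if pvPair (pvChar cs i) (pvChar cs j) then 2 + pvD cs f2 (i + 1) (j - 1) else 0) := by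
          split
          · rw [ih f2 (i + 1) (j - 1) (by omega) (by omega)]
          · rfl
        rw [hinit]
        apply PySem.List.foldl_congr_mem
        intro a k hk
        have hkb := List.mem_range'_1.1 hk
        rw [ih f2 i k (by omega) (by omega), ih f2 (k + 1) j (by omega) (by omega)]

theorem pvF_fuel (cs : List Char) :
    ∀ f1 f2 i j, j - i ≤ f1 → j - i ≤ f2 → pvF cs f1 i j = pvF cs f2 i j := by
  intro f1
  induction f1 with
  | zero =>
    intro f2 i j h1 _
    have hji : j ≤ i := by omega
    cases f2 <;> simp [pvF, hji]
  | succ f1 ih =>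
    intro f2 i j h1 h2
    cases f2 with
    | zero =>
      have hji : j ≤ i := by omega
      simp [pvF, hji]
    | succ f2 =>
      by_cases hji : j ≤ i
      · simp [pvF, hji]
      · have hij : i < j := by omega
        simp only [pvF, if_neg hji]
        rw [ih f2 (i + 1) j (by omega) (by omega)]
        apply PySem.List.foldl_congr_mem
        intro a k hk
        have hkb := List.mem_range'_1.1 hk
        rw [ih f2 (i + 1) (k - 1) (by omega) (by omega), ih f2 (k + 1) j (by omega) (by omega)]

-- width-indexed wrappers (fuel = j - i is always sufficient)
def DwW (cs : List Char) (i j : Nat) : Int := pvD cs (j - i) i j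
def FwW (cs : List Char) (i j : Nat) : Int := pvF cs (j - i) i j

theorem DwW_eq (cs : List Char) (i j : Nat) :
    DwW cs i j = if j ≤ i then 0
    else
      (List.range' i (j - i)).foldl
        (fun a k => max a (DwW cs i k + DwW cs (k + 1) j))
        (if pvPair (pvChar cs i) (pvChar cs j) then 2 + DwW cs (i + 1) (j - 1) else 0) := by
  by_cases hji : j ≤ i
  · have h0 : j - i = 0 := by omega
    simp [DwW, h0, pvD, hji]
  · have hij : i < j := by omega
    rw [if_neg hji]
    rw [show DwW cs i j = pvD cs (j - i - 1 + 1) i j from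
      pvD_fuel cs (j - i) (j - i - 1 + 1) i j (by omega) (by omega)]
    simp only [pvD, if_neg hji]
    have hinit : (if pvPair (pvChar cs i) (pvChar cs j) then 2 + pvD cs (j - i - 1) (i + 1) (j - 1) else 0)
        = (if pvPair (pvChar cs i) (pvChar cs j) then 2 + DwW cs (i + 1) (j - 1) else 0) := by
      split
      · rw [pvD_fuel cs (j - i - 1) (j - 1 - (i + 1)) (i + 1) (j - 1) (by omega) (by omega)]; rfl
      · rfl
    rw [hinit]
    apply PySem.List.foldl_congr_mem
    intro a k hk
    have hkb := List.mem_range'_1.1 hk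
    rw [pvD_fuel cs (j - i - 1) (k - i) i k (by omega) (by omega),
        pvD_fuel cs (j - i - 1) (j - (k + 1)) (k + 1) j (by omega) (by omega)]
    rfl

theorem FwW_eq (cs : List Char) (i j : Nat) :
    FwW cs i j = if j ≤ i then 0
    else
      (List.range' (i + 1) (j - i)).foldl
        (fun best k => if pvPair (pvChar cs i) (pvChar cs k)
          then max best (2 + FwW cs (i + 1) (k - 1) + FwW cs (k + 1) j)
          else best)
        (FwW cs (i + 1) j) := by
  by_cases hji : j ≤ i
  · have h0 : j - i = 0 := by omega
    simp [FwW, h0, pvF, hji]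
  · have hij : i < j := by omega
    rw [if_neg hji]
    rw [show FwW cs i j = pvF cs (j - i - 1 + 1) i j from
      pvF_fuel cs (j - i) (j - i - 1 + 1) i j (by omega) (by omega)]
    simp only [pvF, if_neg hji]
    rw [pvF_fuel cs (j - i - 1) (j - (i + 1)) (i + 1) j (by omega) (by omega)]
    apply PySem.List.foldl_congr_mem
    intro a k hk
    have hkb := List.mem_range'_1.1 hk
    rw [pvF_fuel cs (j - i - 1) (k - 1 - (i + 1)) (i + 1) (k - 1) (by omega) (by omega),
        pvF_fuel cs (j - i - 1) (j - (k + 1)) (k + 1) j (by omega) (by omega)]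
    rfl

theorem DwW_diag (cs : List Char) (i j : Nat) (h : j ≤ i) : DwW cs i j = 0 := by
  rw [DwW_eq, if_pos h]

theorem FwW_diag (cs : List Char) (i j : Nat) (h : j ≤ i) : FwW cs i j = 0 := by
  rw [FwW_eq, if_pos h]

-- ---- elementary bounds on the two recurrences ----

theorem FwW_nonneg (cs : List Char) : ∀ w i j, j - i ≤ w → 0 ≤ FwW cs i j := by
  intro w
  induction w with
  | zero => intro i j h; rw [FwW_diag cs i j (by omega)]
  | succ w ih =>
    intro i j h
    by_cases hji : j ≤ i
    · rw [FwW_diag cs i j hji]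
    · rw [FwW_eq, if_neg hji]
      exact le_trans (ih (i + 1) j (by omega)) (cfold_ge_init _ _ _ _)

theorem FwW_nonneg' (cs : List Char) (i j : Nat) : 0 ≤ FwW cs i j :=
  FwW_nonneg cs (j - i) i j le_rfl

theorem DwW_nonneg (cs : List Char) : ∀ w i j, j - i ≤ w → 0 ≤ DwW cs i j := by
  intro w
  induction w with
  | zero => intro i j h; rw [DwW_diag cs i j (by omega)]
  | succ w ih =>
    intro i j h
    by_cases hji : j ≤ i
    · rw [DwW_diag cs i j hji]
    · rw [DwW_eq, if_neg hji]
      refine le_trans ?_ (mfold_ge_init _ _ _)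
      split
      · have := ih (i + 1) (j - 1) (by omega); omega
      · exact le_rfl

theorem DwW_nonneg' (cs : List Char) (i j : Nat) : 0 ≤ DwW cs i j :=
  DwW_nonneg cs (j - i) i j le_rfl

theorem Fw_skip (cs : List Char) (i j : Nat) (h : i < j) : FwW cs (i + 1) j ≤ FwW cs i j := by
  conv_rhs => rw [FwW_eq, if_neg (by omega : ¬ j ≤ i)]
  exact cfold_ge_init _ _ _ _

theorem Fw_partner (cs : List Char) (i k j : Nat) (h1 : i < k) (h2 : k ≤ j)
    (hp : pvPair (pvChar cs i) (pvChar cs k) = true) :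
    2 + FwW cs (i + 1) (k - 1) + FwW cs (k + 1) j ≤ FwW cs i j := by
  conv_rhs => rw [FwW_eq, if_neg (by omega : ¬ j ≤ i)]
  exact cfold_term_le _ _ _ k (List.mem_range'_1.2 ⟨by omega, by omega⟩) hp _

theorem Dw_split (cs : List Char) (i k j : Nat) (h1 : i ≤ k) (h2 : k < j) :
    DwW cs i k + DwW cs (k + 1) j ≤ DwW cs i j := by
  conv_rhs => rw [DwW_eq, if_neg (by omega : ¬ j ≤ i)]
  exact mfold_term_le _ _ k (List.mem_range'_1.2 ⟨by omega, by omega⟩) _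

theorem Dw_skip (cs : List Char) (i j : Nat) (h : i < j) : DwW cs (i + 1) j ≤ DwW cs i j := by
  have h1 := Dw_split cs i i j le_rfl h
  rw [DwW_diag cs i i le_rfl] at h1
  omega

theorem Dw_start (cs : List Char) (i j : Nat) (h : i < j)
    (hp : pvPair (pvChar cs i) (pvChar cs j) = true) :
    2 + DwW cs (i + 1) (j - 1) ≤ DwW cs i j := by
  conv_rhs => rw [DwW_eq, if_neg (by omega : ¬ j ≤ i)]
  refine le_trans ?_ (mfold_ge_init _ _ _)
  rw [if_pos hp]

-- superadditivity of the partner recurrence: gluing two adjacent intervals never loses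
theorem Fw_superadd (cs : List Char) :
    ∀ d i k j, k - i ≤ d → i ≤ k → k < j →
      FwW cs i k + FwW cs (k + 1) j ≤ FwW cs i j := by
  intro d
  induction d with
  | zero =>
    intro i k j hd hik hkj
    have hk : k = i := by omega
    subst hk
    rw [FwW_diag cs k k le_rfl]
    have := Fw_skip cs k j hkj
    omega
  | succ d ih =>
    intro i k j hd hik hkj
    by_cases hki : k ≤ i
    · have hk : k = i := by omega
      subst hk
      rw [FwW_diag cs k k le_rfl]
      have := Fw_skip cs k j hkj
      omega
    · have hik' : i < k := by omega
      rw [FwW_eq cs i k, if_neg (by omega : ¬ k ≤ i)]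
      rw [← le_sub_iff_add_le]
      apply cfold_le
      · -- init: F(i+1,k) ≤ F(i,j) - F(k+1,j)
        have h1 := ih (i + 1) k j (by omega) (by omega) hkj
        have h2 := Fw_skip cs i j (by omega)
        omega
      · intro m hm hp
        have hmb := List.mem_range'_1.1 hm
        have hm1 : i + 1 ≤ m := hmb.1
        have hm2 : m ≤ k := by omega
        rw [le_sub_iff_add_le]
        by_cases hmk : m = k
        · subst hmk
          rw [FwW_diag cs (m + 1) m (by omega)]
          have := Fw_partner cs i m j (by omega) (by omega) hp
          omega
        · have h3 := ih (m + 1) k j (by omega) (by omega) hkj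
          have h4 := Fw_partner cs i m j (by omega) (by omega) hp
          omega

-- the two recurrences agree on every interval
theorem DF (cs : List Char) : ∀ w i j, j - i ≤ w → DwW cs i j = FwW cs i j := by
  intro w
  induction w with
  | zero =>
    intro i j h
    rw [DwW_diag cs i j (by omega), FwW_diag cs i j (by omega)]
  | succ w ih =>
    intro i j h
    by_cases hji : j ≤ i
    · rw [DwW_diag cs i j hji, FwW_diag cs i j hji]
    · have hij : i < j := by omega
      apply le_antisymm
      · rw [DwW_eq, if_neg hji]
        apply mfold_le
        · by_cases hp : pvPair (pvChar cs i) (pvChar cs j) = true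
          · rw [if_pos hp, ih (i + 1) (j - 1) (by omega)]
            have h1 := Fw_partner cs i j j hij le_rfl hp
            rw [FwW_diag cs (j + 1) j (by omega)] at h1
            omega
          · rw [if_neg hp]; exact FwW_nonneg' cs i j
        · intro k hk
          have hkb := List.mem_range'_1.1 hk
          rw [ih i k (by omega), ih (k + 1) j (by omega)]
          exact Fw_superadd cs (k - i) i k j le_rfl (by omega) (by omega)
      · rw [FwW_eq, if_neg hji]
        apply cfold_le
        · rw [← ih (i + 1) j (by omega)]
          exact Dw_skip cs i j hij
        · intro k hk hp
          have hkb := List.mem_range'_1.1 hk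
          rw [← ih (i + 1) (k - 1) (by omega), ← ih (k + 1) j (by omega)]
          by_cases hkj : k = j
          · subst hkj
            rw [DwW_diag cs (k + 1) k (by omega)]
            have := Dw_start cs i k hij hp
            omega
          · have h1 := Dw_start cs i k (by omega) hp
            have h2 := Dw_split cs i k j (by omega) (by omega)
            omega

-- ---- the dp table of port A: dimensions and entry access ----

def pvDims (n : Nat) (dp : List (List Int)) : Prop :=
  dp.length = n ∧ ∀ r ∈ dp, r.length = n

theorem getD_eq_of_lt (dp : List (List Int)) (i : Nat) (h : i < dp.length) :
    dp.getD i [] = dp[i] := by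
  simp [List.getD_eq_getElem?_getD, List.getElem?_eq_getElem h]

theorem set2_dims (n : Nat) (dp : List (List Int)) (i j : Nat) (v : Int)
    (hd : pvDims n dp) (hi : i < n) : pvDims n (pvSet2 dp i j v) := by
  obtain ⟨hlen, hrows⟩ := hd
  constructor
  · simp [pvSet2, hlen]
  · intro r hr
    rcases List.mem_or_eq_of_mem_set hr with h | h
    · exact hrows r h
    · subst h
      rw [List.length_set, getD_eq_of_lt dp i (by omega)]
      exact hrows _ (List.getElem_mem _)

theorem get2_set2 (n : Nat) (dp : List (List Int)) (i j : Nat) (v : Int)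
    (hd : pvDims n dp) (hi : i < n) (hj : j < n) (i' j' : Nat) :
    pvGet2 (pvSet2 dp i j v) i' j' = if i = i' ∧ j = j' then v else pvGet2 dp i' j' := by
  obtain ⟨hlen, hrows⟩ := hd
  have hil : i < dp.length := by omega
  have hrl : (dp[i] : List Int).length = n := hrows _ (List.getElem_mem _)
  unfold pvSet2 pvGet2
  rw [getD_eq_of_lt dp i hil]
  by_cases hii : i = i'
  · subst hii
    have h1 : (dp.set i (dp[i].set j v)).getD i [] = dp[i].set j v := by
      simp [List.getD_eq_getElem?_getD, List.getElem?_set_self', List.getElem?_eq_getElem hil]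
    rw [h1, getD_eq_of_lt dp i hil]
    by_cases hjj : j = j'
    · subst hjj
      simp [List.getD_eq_getElem?_getD, List.getElem?_set_self',
            List.getElem?_eq_getElem (show j < (dp[i] : List Int).length by omega)]
    · simp [hjj, List.getD_eq_getElem?_getD, List.getElem?_set_ne hjj]
  · have h1 : (dp.set i (dp[i].set j v)).getD i' [] = dp.getD i' [] := by
      simp [List.getD_eq_getElem?_getD, List.getElem?_set_ne hii]
    rw [h1]
    simp [hii]

theorem foldl_dims {α : Type} (n : Nat) (f : List (List Int) → α → List (List Int))
    (hstep : ∀ dp x, pvDims n dp → pvDims n (f dp x)) :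
    ∀ (l : List α) (dp : List (List Int)), pvDims n dp → pvDims n (l.foldl f dp) := by
  intro l
  induction l with
  | nil => intro dp h; exact h
  | cons x l ih => intro dp h; exact ih _ (hstep dp x h)

-- ---- the initial all-zero table ----

theorem foldl_append_rep {α : Type} (r : List Int) :
    ∀ (l : List α) (acc : List (List Int)),
      l.foldl (fun dp _ => dp ++ [r]) acc = acc ++ List.replicate l.length r := by
  intro l
  induction l with
  | nil => intro acc; simp
  | cons x l ih =>
    intro acc
    rw [List.foldl_cons, ih, List.length_cons, List.replicate_succ]
    simp

theorem rep_dims (n : Nat) : pvDims n (List.replicate n (List.replicate n (0 : Int))) := by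
  constructor
  · simp
  · intro r hr
    rw [List.eq_of_mem_replicate hr]
    simp

theorem get2_rep (n : Nat) (i j : Nat) :
    pvGet2 (List.replicate n (List.replicate n (0 : Int))) i j = 0 := by
  unfold pvGet2
  by_cases hi : i < n
  · rw [show (List.replicate n (List.replicate n (0 : Int))).getD i [] = List.replicate n (0 : Int) by
      simp [List.getD_eq_getElem?_getD, List.getElem?_replicate, hi]]
    by_cases hj : j < n
    · simp [List.getD_eq_getElem?_getD, List.getElem?_replicate, hj]
    · simp [List.getD_eq_getElem?_getD, List.getElem?_replicate, hj]
  · rw [show (List.replicate n (List.replicate n (0 : Int))).getD i [] = [] by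
      simp [List.getD_eq_getElem?_getD, List.getElem?_replicate, hi]]
    simp [List.getD]

-- ---- the width-2 prefill loop of port A ----

theorem Dw_width2 (cs : List Char) (i : Nat) :
    DwW cs i (i + 1) = if pvPair (pvChar cs i) (pvChar cs (i + 1)) then 2 else 0 := by
  rw [DwW_eq, if_neg (by omega : ¬ i + 1 ≤ i)]
  have h1 : i + 1 - i = 1 := by omega
  rw [h1]
  show List.foldl _ _ [i] = _
  rw [List.foldl_cons, List.foldl_nil]
  rw [DwW_diag cs i i le_rfl, DwW_diag cs (i + 1) (i + 1) le_rfl,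
      DwW_diag cs (i + 1) (i + 1 - 1) (by omega)]
  split
  · simp
  · simp

theorem dp1_char (cs : List Char) (n : Nat) :
    ∀ (cnt s : Nat) (dp : List (List Int)), pvDims n dp → s + cnt + 1 ≤ n →
    ∀ i' j', i' < n → j' < n →
      pvGet2 ((List.range' s cnt).foldl (fun dp i =>
          if pvPair (pvChar cs i) (pvChar cs (i + 1)) then pvSet2 dp i (i + 1) 2 else dp) dp) i' j'
        = if s ≤ i' ∧ i' < s + cnt ∧ j' = i' + 1 ∧ pvPair (pvChar cs i') (pvChar cs (i' + 1)) = true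
          then 2 else pvGet2 dp i' j' := by
  intro cnt
  induction cnt with
  | zero =>
    intro s dp hd hb i' j' hi' hj'
    rw [List.range'_zero, List.foldl_nil]
    rw [if_neg (by omega)]
  | succ cnt ih =>
    intro s dp hd hb i' j' hi' hj'
    rw [List.range'_succ, List.foldl_cons]
    have hdp' : pvDims n (if pvPair (pvChar cs s) (pvChar cs (s + 1)) then pvSet2 dp s (s + 1) 2 else dp) := by
      split
      · exact set2_dims n dp s (s + 1) 2 hd (by omega)
      · exact hd
    rw [ih (s + 1) _ hdp' (by omega) i' j' hi' hj']
    have hstep : pvGet2 (if pvPair (pvChar cs s) (pvChar cs (s + 1)) then pvSet2 dp s (s + 1) 2 else dp) i' j'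
        = if s = i' ∧ s + 1 = j' ∧ pvPair (pvChar cs s) (pvChar cs (s + 1)) = true then 2 else pvGet2 dp i' j' := by
      by_cases hp : pvPair (pvChar cs s) (pvChar cs (s + 1)) = true
      · rw [if_pos hp, get2_set2 n dp s (s + 1) 2 hd (by omega) (by omega) i' j']
        by_cases hij : s = i' ∧ s + 1 = j'
        · rw [if_pos hij, if_pos ⟨hij.1, hij.2, hp⟩]
        · rw [if_neg hij, if_neg (by tauto)]
      · rw [if_neg hp, if_neg (by tauto)]
    rw [hstep]
    by_cases h1 : s + 1 ≤ i' ∧ i' < s + 1 + cnt ∧ j' = i' + 1 ∧ pvPair (pvChar cs i') (pvChar cs (i' + 1)) = true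
    · rw [if_pos h1, if_pos (by obtain ⟨a, b, c, d⟩ := h1; exact ⟨by omega, by omega, c, d⟩)]
    · rw [if_neg h1]
      by_cases h2 : s = i' ∧ s + 1 = j' ∧ pvPair (pvChar cs s) (pvChar cs (s + 1)) = true
      · obtain ⟨ha, hb2, hc⟩ := h2
        rw [if_pos ⟨ha, hb2, hc⟩, if_pos ⟨by omega, by omega, by omega, ha ▸ hc⟩]
      · rw [if_neg h2, if_neg ?_]
        intro ⟨ha, hb2, hc, hd2⟩
        by_cases hsi : s = i'
        · subst hsi; exact h2 ⟨rfl, by omega, hd2⟩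
        · exact h1 ⟨by omega, by omega, hc, hd2⟩

-- ---- the inner k-loop: repeated writes to dp[i][j] fold into one max-accumulation ----

theorem inner_char (cs : List Char) (n i j : Nat) (hi : i < n) (hj : j < n) :
    ∀ (l : List Nat) (dp : List (List Int)), pvDims n dp → (∀ k ∈ l, i ≤ k ∧ k < j) →
    ∀ i' j',
      pvGet2 (l.foldl (fun dp k =>
          pvSet2 dp i j (max (pvGet2 dp i j) (pvGet2 dp i k + pvGet2 dp (k + 1) j))) dp) i' j'
        = if i = i' ∧ j = j'
          then l.foldl (fun a k => max a (pvGet2 dp i k + pvGet2 dp (k + 1) j)) (pvGet2 dp i j)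
          else pvGet2 dp i' j' := by
  intro l
  induction l with
  | nil =>
    intro dp hd hbnd i' j'
    rw [List.foldl_nil, List.foldl_nil]
    split
    · rename_i h; rw [← h.1, ← h.2]
    · rfl
  | cons k l ih =>
    intro dp hd hbnd i' j'
    obtain ⟨hk1, hk2⟩ := hbnd k List.mem_cons_self
    rw [List.foldl_cons, List.foldl_cons]
    have hd' : pvDims n (pvSet2 dp i j (max (pvGet2 dp i j) (pvGet2 dp i k + pvGet2 dp (k + 1) j))) :=
      set2_dims n dp i j _ hd hi
    rw [ih _ hd' (fun k' hk' => hbnd k' (List.mem_cons_of_mem _ hk')) i' j']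
    have hEq := get2_set2 n dp i j (max (pvGet2 dp i j) (pvGet2 dp i k + pvGet2 dp (k + 1) j)) hd hi hj
    have hown : pvGet2 (pvSet2 dp i j (max (pvGet2 dp i j) (pvGet2 dp i k + pvGet2 dp (k + 1) j))) i j
        = max (pvGet2 dp i j) (pvGet2 dp i k + pvGet2 dp (k + 1) j) := by
      rw [hEq i j, if_pos ⟨rfl, rfl⟩]
    split
    · rename_i hij'
      rw [hown]
      apply PySem.List.foldl_congr_mem
      intro a k' hk'
      obtain ⟨hk'1, hk'2⟩ := hbnd k' (List.mem_cons_of_mem _ hk')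
      rw [hEq i k', if_neg (by omega), hEq (k' + 1) j, if_neg (by omega)]
    · rename_i hij'
      rw [hEq i' j', if_neg hij']

-- ---- one (i, j) body step computes DwW i j and changes nothing else ----

theorem body_char (cs : List Char) (n i j : Nat) (dp : List (List Int))
    (hd : pvDims n dp) (hij : i < j) (hjn : j < n)
    (hsub : ∀ a b, a < n → b < n → b - a < j - i → pvGet2 dp a b = DwW cs a b)
    (hown : pvGet2 dp i j = 0 ∨ pvGet2 dp i j = DwW cs i j) :
    ∀ i' j',
      pvGet2 ((List.range' i (j - i)).foldl (fun dp k =>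
          pvSet2 dp i j (max (pvGet2 dp i j) (pvGet2 dp i k + pvGet2 dp (k + 1) j)))
        (if pvPair (pvChar cs i) (pvChar cs j)
         then pvSet2 dp i j (2 + pvGet2 dp (i + 1) (j - 1)) else dp)) i' j'
        = if i = i' ∧ j = j' then DwW cs i j else pvGet2 dp i' j' := by
  have hin : i < n := by omega
  have hbnd : ∀ k ∈ List.range' i (j - i), i ≤ k ∧ k < j := by
    intro k hk
    have := List.mem_range'_1.1 hk
    omega
  by_cases hp : pvPair (pvChar cs i) (pvChar cs j) = true
  · rw [if_pos hp]
    have hdA : pvDims n (pvSet2 dp i j (2 + pvGet2 dp (i + 1) (j - 1))) :=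
      set2_dims n dp i j _ hd hin
    have hEq := get2_set2 n dp i j (2 + pvGet2 dp (i + 1) (j - 1)) hd hin hjn
    intro i' j'
    rw [inner_char cs n i j hin hjn _ _ hdA hbnd i' j']
    split
    · rename_i hij'
      have hinit : pvGet2 (pvSet2 dp i j (2 + pvGet2 dp (i + 1) (j - 1))) i j
          = 2 + DwW cs (i + 1) (j - 1) := by
        rw [hEq i j, if_pos ⟨rfl, rfl⟩, hsub (i + 1) (j - 1) (by omega) (by omega) (by omega)]
      rw [hinit]
      rw [DwW_eq cs i j, if_neg (by omega : ¬ j ≤ i), if_pos hp]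
      apply PySem.List.foldl_congr_mem
      intro a k hk
      obtain ⟨hk1, hk2⟩ := hbnd k hk
      rw [hEq i k, if_neg (by omega), hEq (k + 1) j, if_neg (by omega),
          hsub i k (by omega) (by omega) (by omega),
          hsub (k + 1) j (by omega) (by omega) (by omega)]
    · rename_i hij'
      rw [hEq i' j', if_neg hij']
  · rw [if_neg hp]
    intro i' j'
    rw [inner_char cs n i j hin hjn _ _ hd hbnd i' j']
    split
    · rename_i hij'
      have hterms : (List.range' i (j - i)).foldl
            (fun a k => max a (pvGet2 dp i k + pvGet2 dp (k + 1) j)) (pvGet2 dp i j)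
          = (List.range' i (j - i)).foldl
            (fun a k => max a (DwW cs i k + DwW cs (k + 1) j)) (pvGet2 dp i j) := by
        apply PySem.List.foldl_congr_mem
        intro a k hk
        obtain ⟨hk1, hk2⟩ := hbnd k hk
        rw [hsub i k (by omega) (by omega) (by omega),
            hsub (k + 1) j (by omega) (by omega) (by omega)]
      rw [hterms]
      have hDw : DwW cs i j = (List.range' i (j - i)).foldl
            (fun a k => max a (DwW cs i k + DwW cs (k + 1) j)) 0 := by
        rw [DwW_eq cs i j, if_neg (by omega : ¬ j ≤ i), if_neg hp]
      rcases hown with h0 | h0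
      · rw [h0, hDw]
      · rw [h0]
        rw [show DwW cs i j = max (DwW cs i j) 0 from (max_eq_left (DwW_nonneg' cs i j)).symm]
        rw [mfold_from_max]
        rw [← hDw, max_self]
        rw [max_eq_left (DwW_nonneg' cs i j)]
    · rename_i hij'
      rfl

-- ---- the i-loop at a fixed length: invariant over the processed prefix ----

def MidP (cs : List Char) (n len s : Nat) (dp : List (List Int)) : Prop :=
  pvDims n dp ∧
  (∀ a b, a < n → b < n → b - a < len - 1 → pvGet2 dp a b = DwW cs a b) ∧
  (∀ a b, a < n → b < n → b - a = len - 1 → a < s → pvGet2 dp a b = DwW cs a b) ∧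
  (∀ a b, a < n → b < n → b - a = len - 1 → s ≤ a → pvGet2 dp a b = 0 ∨ pvGet2 dp a b = DwW cs a b) ∧
  (∀ a b, a < n → b < n → b - a > len - 1 → pvGet2 dp a b = 0)

theorem set2_dims' (n : Nat) (dp : List (List Int)) (i j : Nat) (v : Int)
    (hd : pvDims n dp) : pvDims n (pvSet2 dp i j v) := by
  by_cases hi : i < n
  · exact set2_dims n dp i j v hd hi
  · have heq : pvSet2 dp i j v = dp := by
      unfold pvSet2
      exact List.set_eq_of_length_le (by rw [hd.1]; omega)
    rw [heq]; exact hd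

theorem body_dims (cs : List Char) (n len : Nat) (dp : List (List Int)) (i : Nat)
    (hd : pvDims n dp) :
    pvDims n ((fun dp i =>
      let j := i + len - 1
      let dpA := if pvPair (pvChar cs i) (pvChar cs j)
                 then pvSet2 dp i j (2 + pvGet2 dp (i + 1) (j - 1)) else dp
      (List.range' i (j - i)).foldl (fun dp k =>
        pvSet2 dp i j (max (pvGet2 dp i j) (pvGet2 dp i k + pvGet2 dp (k + 1) j))) dpA) dp i) := by
  apply foldl_dims n _ (fun dp' k hdp' => set2_dims' n dp' _ _ _ hdp')
  split
  · exact set2_dims' n dp _ _ _ hd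
  · exact hd

theorem iloop_char (cs : List Char) (n len : Nat) (h2 : 2 ≤ len) (hln : len ≤ n) :
    ∀ (cnt s : Nat) (dp : List (List Int)), s + cnt ≤ n - len + 1 → MidP cs n len s dp →
    MidP cs n len (s + cnt) ((List.range' s cnt).foldl (fun dp i =>
      let j := i + len - 1
      let dpA := if pvPair (pvChar cs i) (pvChar cs j)
                 then pvSet2 dp i j (2 + pvGet2 dp (i + 1) (j - 1)) else dp
      (List.range' i (j - i)).foldl (fun dp k =>
        pvSet2 dp i j (max (pvGet2 dp i j) (pvGet2 dp i k + pvGet2 dp (k + 1) j))) dpA) dp) := by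
  intro cnt
  induction cnt with
  | zero =>
    intro s dp hb hm
    rw [List.range'_zero, List.foldl_nil]
    simpa using hm
  | succ cnt ih =>
    intro s dp hb hm
    rw [List.range'_succ, List.foldl_cons]
    obtain ⟨hd, M1, M2, M3, M4⟩ := hm
    have hsn : s < n := by omega
    have hJn : s + len - 1 < n := by omega
    have hij : s < s + len - 1 := by omega
    have hbody : ∀ i' j',
        pvGet2 ((fun dp i =>
          let j := i + len - 1
          let dpA := if pvPair (pvChar cs i) (pvChar cs j)
                     then pvSet2 dp i j (2 + pvGet2 dp (i + 1) (j - 1)) else dp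
          (List.range' i (j - i)).foldl (fun dp k =>
            pvSet2 dp i j (max (pvGet2 dp i j) (pvGet2 dp i k + pvGet2 dp (k + 1) j))) dpA) dp s) i' j'
          = if s = i' ∧ s + len - 1 = j' then DwW cs s (s + len - 1) else pvGet2 dp i' j' :=
      body_char cs n s (s + len - 1) dp hd hij hJn
        (fun a b ha hb' hw => M1 a b ha hb' (by omega))
        (M3 s (s + len - 1) hsn hJn (by omega) le_rfl)
    have hd' := body_dims cs n len dp s hd
    have hmid' : MidP cs n len (s + 1) ((fun dp i =>
        let j := i + len - 1
        let dpA := if pvPair (pvChar cs i) (pvChar cs j)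
                   then pvSet2 dp i j (2 + pvGet2 dp (i + 1) (j - 1)) else dp
        (List.range' i (j - i)).foldl (fun dp k =>
          pvSet2 dp i j (max (pvGet2 dp i j) (pvGet2 dp i k + pvGet2 dp (k + 1) j))) dpA) dp s) := by
      refine ⟨hd', ?_, ?_, ?_, ?_⟩
      · intro a b ha hb' hw
        rw [hbody a b, if_neg (by intro ⟨x, y⟩; omega)]
        exact M1 a b ha hb' hw
      · intro a b ha hb' hw has
        by_cases hc : s = a ∧ s + len - 1 = b
        · rw [hbody a b, if_pos hc, hc.2, hc.1]
        · rw [hbody a b, if_neg hc]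
          by_cases has' : a < s
          · exact M2 a b ha hb' hw has'
          · exact absurd ⟨by omega, by omega⟩ hc
      · intro a b ha hb' hw has
        rw [hbody a b, if_neg (by intro ⟨x, y⟩; omega)]
        exact M3 a b ha hb' hw (by omega)
      · intro a b ha hb' hw
        rw [hbody a b, if_neg (by intro ⟨x, y⟩; omega)]
        exact M4 a b ha hb' hw
    rw [show s + (cnt + 1) = (s + 1) + cnt by omega]
    exact ih (s + 1) _ (by omega) hmid'

-- ---- the outer length-loop ----

def DoneP (cs : List Char) (n L : Nat) (dp : List (List Int)) : Prop :=
  pvDims n dp ∧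
  ∀ a b, a < n → b < n → pvGet2 dp a b = if b - a < L then DwW cs a b else 0

theorem outer_char (cs : List Char) (n : Nat) :
    ∀ (cnt L : Nat) (dp : List (List Int)), 2 ≤ L → L + cnt ≤ n + 1 →
    DoneP cs n (max (L - 1) 2) dp →
    DoneP cs n (max (L + cnt - 1) 2) ((List.range' L cnt).foldl (fun dp len =>
      (List.range' 0 (n - len + 1)).foldl (fun dp i =>
        let j := i + len - 1
        let dpA := if pvPair (pvChar cs i) (pvChar cs j)
                   then pvSet2 dp i j (2 + pvGet2 dp (i + 1) (j - 1)) else dp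
        (List.range' i (j - i)).foldl (fun dp k =>
          pvSet2 dp i j (max (pvGet2 dp i j) (pvGet2 dp i k + pvGet2 dp (k + 1) j))) dpA) dp) dp) := by
  intro cnt
  induction cnt with
  | zero =>
    intro L dp h2 hb hdone
    rw [List.range'_zero, List.foldl_nil]
    simpa using hdone
  | succ cnt ih =>
    intro L dp h2 hb hdone
    rw [List.range'_succ, List.foldl_cons]
    obtain ⟨hd, hD⟩ := hdone
    have hLn : L ≤ n := by omega
    have hm1 : L - 1 ≤ max (L - 1) 2 := le_max_left _ _
    have hm2 : 2 ≤ max (L - 1) 2 := le_max_right _ _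
    have hm3 : max (L - 1) 2 ≤ L := max_le (by omega) h2
    have hmid0 : MidP cs n L 0 dp := by
      refine ⟨hd, ?_, ?_, ?_, ?_⟩
      · intro a b ha hb' hw
        rw [hD a b ha hb', if_pos (by omega)]
      · intro a b _ _ _ h; omega
      · intro a b ha hb' hw _
        rw [hD a b ha hb']
        split
        · exact Or.inr rfl
        · exact Or.inl rfl
      · intro a b ha hb' hw
        rw [hD a b ha hb', if_neg (by omega)]
    have hmid := iloop_char cs n L h2 hLn (n - L + 1) 0 dp (by omega) hmid0
    obtain ⟨hd', N1, N2, N3, N4⟩ := hmid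
    have hdone' : DoneP cs n L ((List.range' 0 (n - L + 1)).foldl (fun dp i =>
        let j := i + L - 1
        let dpA := if pvPair (pvChar cs i) (pvChar cs j)
                   then pvSet2 dp i j (2 + pvGet2 dp (i + 1) (j - 1)) else dp
        (List.range' i (j - i)).foldl (fun dp k =>
          pvSet2 dp i j (max (pvGet2 dp i j) (pvGet2 dp i k + pvGet2 dp (k + 1) j))) dpA) dp) := by
      refine ⟨hd', ?_⟩
      intro a b ha hb'
      by_cases hba : b - a < L
      · rw [if_pos hba]
        by_cases hba' : b - a < L - 1
        · exact N1 a b ha hb' hba'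
        · exact N2 a b ha hb' (by omega) (by omega)
      · rw [if_neg hba]
        exact N4 a b ha hb' (by omega)
    have hih := ih (L + 1) _ (by omega) (by omega) (by
      rw [show max (L + 1 - 1) 2 = L by omega]
      exact hdone')
    rw [show max (L + (cnt + 1) - 1) 2 = max (L + 1 + cnt - 1) 2 by omega]
    exact hih

-- ---- assembly: port A's value is DwW 0 (n-1) = FwW 0 (n-1) = port B's value ----

theorem A_eq_alt (s : String) (hs : s ≠ "") :
    longest_correct_bracket_subsequence s = longest_correct_bracket_subsequence_alt s := by
  have hcs : s.toList ≠ [] := by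
    intro hh
    apply hs
    have := congrArg String.ofList hh
    simpa using this
  have hn : 0 < s.toList.length := List.length_pos_iff.mpr hcs
  simp only [longest_correct_bracket_subsequence, longest_correct_bracket_subsequence_alt]
  simp only [List.range_eq_range']
  rw [foldl_append_rep]
  simp only [List.length_range', List.nil_append]
  set cs := s.toList with hcs'
  set n := cs.length with hn'
  have h1 : DoneP cs n 2 ((List.range' 0 (n - 1)).foldl (fun dp i =>
      if pvPair (pvChar cs i) (pvChar cs (i + 1)) then pvSet2 dp i (i + 1) 2 else dp)
      (List.replicate n (List.replicate n (0 : Int)))) := by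
    refine ⟨?_, ?_⟩
    · apply foldl_dims n _ (fun dp' i hdp' => by
        show pvDims n (if pvPair (pvChar cs i) (pvChar cs (i + 1)) then pvSet2 dp' i (i + 1) 2 else dp')
        split
        · exact set2_dims' n dp' _ _ _ hdp'
        · exact hdp')
      exact rep_dims n
    · intro a b ha hb
      rw [dp1_char cs n (n - 1) 0 _ (rep_dims n) (by omega) a b ha hb]
      by_cases hb2 : b = a + 1
      · subst hb2
        rw [Dw_width2 cs a]
        by_cases hp : pvPair (pvChar cs a) (pvChar cs (a + 1)) = true
        · rw [if_pos ⟨by omega, by omega, rfl, hp⟩, if_pos (by omega), if_pos hp]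
        · rw [if_neg (by tauto), if_pos (by omega), if_neg hp, get2_rep]
      · rw [if_neg (by tauto), get2_rep]
        by_cases hba : b - a < 2
        · rw [if_pos hba, DwW_diag cs a b (by omega)]
        · rw [if_neg hba]
  have h2 := outer_char cs n (n - 1) 2 _ le_rfl (by omega)
    (by rw [show max (2 - 1) 2 = 2 by decide]; exact h1)
  rw [show max (2 + (n - 1) - 1) 2 = max n 2 by omega] at h2
  obtain ⟨_, hval⟩ := h2
  rw [hval 0 (n - 1) (by omega) (by omega),
      if_pos (by have := le_max_left n 2; omega)]
  rw [DF cs (n - 1) 0 (n - 1) (by omega)]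
  unfold FwW
  exact pvF_fuel cs (n - 1 - 0) n 0 (n - 1) (by omega) (by omega)

-- ===== VERDICT (by name: the statement is the Claim_ definition above) =====
theorem longest_correct_bracket_subsequence_spec : Claim_equal_longest_correct_bracket_subsequence := by
  intro s _ hpre
  unfold Spec_longest_correct_bracket_subsequence
  exact A_eq_alt s hpre
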